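-- pv_equiv track=rewrite | github.com/rosa-m7/ScalIoT-repo | my-app/controllers/funciones_home.py | contar_activaciones_estado_0
-- ===== SOURCE A (Python) =====
-- def contar_activaciones_estado_0(datos_sensores):
--     """
--     Calcula las activaciones de dos maneras:
--     1. Suma 'activaciones_acumuladas' si existe (nueva estructura).
--     2. Cuenta los hijos del nodo 'activaciones' si existe (antigua estructura).
--     """
--     conteo = {}
--     if not isinstance(datos_sensores, dict):
--         return conteo
--
--     for sensor, sensor_data in datos_sensores.items():
--         total_activaciones = 0
--         is_new_format = False
--
--         if isinstance(sensor_data, dict):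
--             # Primero, determinar el formato de los datos para este sensor
--             # Buscamos la presencia de 'activaciones_acumuladas' en cualquier sub-registro
--             for push_id_data in sensor_data.values():
--                 if isinstance(push_id_data, dict) and "activaciones_acumuladas" in push_id_data:
--                     is_new_format = True
--                     break  # Formato nuevo detectado, no es necesario seguir buscando
--
--             # Ahora, procesar según el formato detectado
--             if is_new_format:
--                 # Si es formato nuevo, sumar todas las 'activaciones_acumuladas'
--                 for push_id_data in sensor_data.values():
--                     if isinstance(push_id_data, dict):
--                         total_activaciones += push_id_data.get("activaciones_acumuladas", 0)
--             else:
--                 # Si no, buscar el formato antiguo (nodo 'activaciones')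
--                 activaciones_node = sensor_data.get("activaciones")
--                 if isinstance(activaciones_node, dict):
--                     # Contar el número de hijos (push IDs)
--                     total_activaciones = len(activaciones_node)
--
--         conteo[sensor] = total_activaciones
--
--     return conteo
-- ===== SOURCE B (Python) =====
-- def contar_activaciones_estado_0(datos_sensores):
--     if not isinstance(datos_sensores, dict):
--         return {}
--
--     # Flatten everything into global (sensor, accumulated-value) pairs...
--     pares = [(sensor, rec["activaciones_acumuladas"])
--              for sensor, sd in datos_sensores.items() if isinstance(sd, dict)
--              for rec in sd.values()
--              if isinstance(rec, dict) and "activaciones_acumuladas" in rec]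
--
--     # ...group them into an index sensor -> list of values...
--     acumulados = {}
--     for sensor, v in pares:
--         acumulados.setdefault(sensor, []).append(v)
--
--     # ...and assemble: indexed sensors get the sum, the rest the legacy fallback.
--     conteo = {}
--     for sensor, sd in datos_sensores.items():
--         vals = acumulados.get(sensor, [])
--         if vals:
--             conteo[sensor] = sum(vals)
--         else:
--             act = sd.get("activaciones") if isinstance(sd, dict) else None
--             conteo[sensor] = len(act) if isinstance(act, dict) else 0
--     return conteo
-- ===== Notes on version B (the rewrite author's own statement) =====
-- stated objective: alternative
-- what changed: B replaces A's per-sensor two-pass scan (detect format, then re-scan to sum) by a global pipeline: flatten all sub-records into (sensor, value) pairs, group them into a hash index sensor->values built once, then assemble totals by lookup (sum of the indexed values, legacy len fallback when the sensor is absent from the index).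
import Mathlib
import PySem

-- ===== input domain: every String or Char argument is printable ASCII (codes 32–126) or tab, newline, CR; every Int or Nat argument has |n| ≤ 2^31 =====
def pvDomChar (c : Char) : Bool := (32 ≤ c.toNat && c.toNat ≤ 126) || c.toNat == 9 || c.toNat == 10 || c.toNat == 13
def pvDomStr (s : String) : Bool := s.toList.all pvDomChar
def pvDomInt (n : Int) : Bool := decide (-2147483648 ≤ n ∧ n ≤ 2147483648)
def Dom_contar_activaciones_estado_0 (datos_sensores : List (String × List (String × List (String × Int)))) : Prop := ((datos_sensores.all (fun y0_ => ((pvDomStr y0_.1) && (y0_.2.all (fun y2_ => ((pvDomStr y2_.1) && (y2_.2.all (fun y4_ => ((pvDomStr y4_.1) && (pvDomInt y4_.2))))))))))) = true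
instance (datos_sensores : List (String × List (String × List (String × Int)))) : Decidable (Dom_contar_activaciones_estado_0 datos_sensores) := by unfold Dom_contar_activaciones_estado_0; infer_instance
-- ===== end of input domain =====

-- B replaces A's per-sensor two-pass scan by a global flatten -> group-into-index -> lookup-assembly pipeline: same cost, a genuinely different decomposition. Pre_ excludes duplicate sensor names (impossible for a Python dict input).


-- ===== PORT A =====
-- Literal port of A: for each sensor, first scan for 'activaciones_acumuladas' (any = loop with break),
-- then either sum the accumulated values or fall back to len(sensor_data.get("activaciones")).
def contar_activaciones_estado_0 (datos_sensores : List (String × List (String × List (String × Int)))) : List (String × Int) :=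
  (datos_sensores.foldl (fun (conteo : PySem.Dict String Int) sp =>
    let sensor_data := sp.2
    let is_new_format := sensor_data.any (fun q => (PySem.Dict.mk q.2).contains "activaciones_acumuladas")
    let total_activaciones : Int :=
      if is_new_format then
        sensor_data.foldl (fun acc q => acc + (PySem.Dict.mk q.2).getD "activaciones_acumuladas" 0) 0
      else
        match (PySem.Dict.mk sensor_data).get? "activaciones" with
        | some node => (node.length : Int)
        | none => 0
    conteo.insert sp.1 total_activaciones) PySem.Dict.empty).items

-- ===== PORT B =====
-- B step 1: the flat list of (sensor, accumulated-value) pairs (the comprehension in Source B).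
def pvPares (datos_sensores : List (String × List (String × List (String × Int)))) : List (String × Int) :=
  datos_sensores.flatMap (fun sp =>
    sp.2.filterMap (fun q =>
      ((PySem.Dict.mk q.2).get? "activaciones_acumuladas").map (fun v => (sp.1, v))))

-- B steps 2+3: group the pairs into the index (setdefault/append loop), then assemble by lookup.
def contar_activaciones_estado_0_alt (datos_sensores : List (String × List (String × List (String × Int)))) : List (String × Int) :=
  let acumulados : PySem.Dict String (List Int) :=
    (pvPares datos_sensores).foldl (fun d p => d.modify p.1 [] (· ++ [p.2])) PySem.Dict.empty
  (datos_sensores.foldl (fun (conteo : PySem.Dict String Int) sp =>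
    let vals := acumulados.getD sp.1 []
    conteo.insert sp.1 (if vals ≠ [] then vals.sum
      else match (PySem.Dict.mk sp.2).get? "activaciones" with
           | some node => (node.length : Int)
           | none => 0)) PySem.Dict.empty).items

-- ===== PRECONDITION & SPEC =====
-- Pre_ excludes association lists with duplicate sensor names: a Python dict cannot carry them,
-- and on such lists A's last-occurrence overwrite vs B's index merging across occurrences differ.
def Pre_contar_activaciones_estado_0 (datos_sensores : List (String × List (String × List (String × Int)))) : Prop :=
  (datos_sensores.map Prod.fst).Nodup
instance (datos_sensores : List (String × List (String × List (String × Int)))) : Decidable (Pre_contar_activaciones_estado_0 datos_sensores) := by unfold Pre_contar_activaciones_estado_0; infer_instance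

def pvWitness_contar_activaciones_estado_0 : (List (String × List (String × List (String × Int)))) :=
  [("s1", [("p", [("activaciones_acumuladas", 2), ("x", 1)]), ("q", [])]),
   ("s2", [("activaciones", [("a", 1), ("b", 2)])])]

def Spec_contar_activaciones_estado_0 (datos_sensores : List (String × List (String × List (String × Int)))) (out : List (String × Int)) : Prop := out = contar_activaciones_estado_0_alt datos_sensores
instance (datos_sensores : List (String × List (String × List (String × Int)))) (out : List (String × Int)) : Decidable (Spec_contar_activaciones_estado_0 datos_sensores out) := by unfold Spec_contar_activaciones_estado_0; infer_instance

-- ===== CLAIM (what is proved, stated in full; the proofs are below) =====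
def Claim_equal_contar_activaciones_estado_0 : Prop := ∀ (datos_sensores : List (String × List (String × List (String × Int)))), Dom_contar_activaciones_estado_0 datos_sensores → Pre_contar_activaciones_estado_0 datos_sensores → Spec_contar_activaciones_estado_0 datos_sensores (contar_activaciones_estado_0 datos_sensores)

-- ===== LEMMAS AND PROOFS =====

-- The carriers of one sensor: the accumulated values its key-bearing sub-records hold.
def pvCarriers (sd : List (String × List (String × Int))) : List Int :=
  sd.filterMap (fun q => (PySem.Dict.mk q.2).get? "activaciones_acumuladas")

-- every pair in pvPares carries the name of a sensor of the list
lemma pvPares_fst_mem (ds : List (String × List (String × List (String × Int)))) (p : String × Int)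
    (h : p ∈ pvPares ds) : p.1 ∈ ds.map Prod.fst := by
  unfold pvPares at h
  rcases List.mem_flatMap.mp h with ⟨sp, hsp, hp⟩
  rcases List.mem_filterMap.mp hp with ⟨q, _, hq⟩
  rcases Option.map_eq_some_iff.mp hq with ⟨v, _, rfl⟩
  exact List.mem_map.mpr ⟨sp, hsp, rfl⟩

-- with distinct sensor names, the pairs filtered to one sensor are exactly its carriers
lemma pvFilter_pares (ds : List (String × List (String × List (String × Int))))
    (hnd : (ds.map Prod.fst).Nodup) (s : String) (sd : List (String × List (String × Int)))
    (hmem : (s, sd) ∈ ds) :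
    ((pvPares ds).filter (fun p => p.1 == s)).map Prod.snd = pvCarriers sd := by
  induction ds with
  | nil => cases hmem
  | cons hd tl ih =>
    have hnd' := hnd
    rw [List.map_cons, List.nodup_cons] at hnd'
    unfold pvPares
    rw [List.flatMap_cons, List.filter_append, List.map_append]
    rcases List.mem_cons.mp hmem with heq | htl
    · -- hd = (s, sd); the head contributes all its carriers, the tail nothing
      cases heq
      have h1 : (sd.filterMap (fun q =>
          ((PySem.Dict.mk q.2).get? "activaciones_acumuladas").map (fun v => (s, v)))).filter
            (fun p => p.1 == s) =
          sd.filterMap (fun q =>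
          ((PySem.Dict.mk q.2).get? "activaciones_acumuladas").map (fun v => (s, v))) := by
        apply List.filter_eq_self.mpr
        intro p hp
        rcases List.mem_filterMap.mp hp with ⟨q, _, hq⟩
        rcases Option.map_eq_some_iff.mp hq with ⟨v, _, rfl⟩
        simp
      have h2 : ((pvPares tl).filter (fun p => p.1 == s)) = [] := by
        apply List.filter_eq_nil_iff.mpr
        intro p hp
        have := pvPares_fst_mem tl p hp
        simp only [beq_iff_eq]
        intro hps
        exact hnd'.1 (hps ▸ this)
      unfold pvPares at h2
      rw [h1, h2, List.map_nil, List.append_nil, ← List.map_filterMap]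
      unfold pvCarriers
      rw [List.map_map]
      simp
    · -- s is in the tail, so hd.1 ≠ s and the head contributes nothing
      have hne : hd.1 ≠ s := by
        intro he
        exact hnd'.1 (he ▸ List.mem_map.mpr ⟨(s, sd), htl, rfl⟩)
      have h1 : (hd.2.filterMap (fun q =>
          ((PySem.Dict.mk q.2).get? "activaciones_acumuladas").map (fun v => (hd.1, v)))).filter
            (fun p => p.1 == s) = [] := by
        apply List.filter_eq_nil_iff.mpr
        intro p hp
        rcases List.mem_filterMap.mp hp with ⟨q, _, hq⟩
        rcases Option.map_eq_some_iff.mp hq with ⟨v, _, rfl⟩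
        simpa using hne
      rw [h1, List.map_nil, List.nil_append]
      exact ih hnd'.2 htl

-- the carriers are nonempty exactly when A's format-detection scan fires
lemma pvCarriers_ne_nil_iff (sd : List (String × List (String × Int))) :
    (pvCarriers sd ≠ []) ↔
      sd.any (fun q => (PySem.Dict.mk q.2).contains "activaciones_acumuladas") = true := by
  unfold pvCarriers
  rw [Ne, List.filterMap_eq_nil_iff, List.any_eq_true]
  constructor
  · intro h
    by_contra hc
    push Not at hc
    apply h
    intro q hq
    have := hc q hq
    rw [PySem.Dict.contains_eq_isSome_get?] at this
    exact Option.not_isSome_iff_eq_none.mp (by simpa using this)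
  · rintro ⟨q, hq, hc⟩ hall
    rw [PySem.Dict.contains_eq_isSome_get?, hall q hq] at hc
    simp at hc

-- the sum of the carriers equals A's getD-accumulating loop
lemma pvCarriers_sum (sd : List (String × List (String × Int))) (a : Int) :
    sd.foldl (fun acc q => acc + (PySem.Dict.mk q.2).getD "activaciones_acumuladas" 0) a =
      a + (pvCarriers sd).sum := by
  induction sd generalizing a with
  | nil => simp [pvCarriers]
  | cons q tl ih =>
    unfold pvCarriers
    rw [List.foldl_cons, ih, List.filterMap_cons]
    cases hq : (PySem.Dict.mk q.2).get? "activaciones_acumuladas" <;>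
      simp [hq, PySem.Dict.getD_eq_get?_getD, pvCarriers]
    ring

-- ===== VERDICT (by name: the statement is the Claim_ definition above) =====
theorem contar_activaciones_estado_0_spec : Claim_equal_contar_activaciones_estado_0 := by
  intro ds _ hpre
  unfold Spec_contar_activaciones_estado_0 contar_activaciones_estado_0 contar_activaciones_estado_0_alt
  congr 1
  apply PySem.List.foldl_congr_mem
  intro acc sp hmem
  have hidx : ((pvPares ds).foldl (fun d p => d.modify p.1 [] (· ++ [p.2]))
      PySem.Dict.empty).getD sp.1 [] = pvCarriers sp.2 := by
    rw [PySem.Dict.getD_foldl_modify_append, PySem.Dict.getD_empty, List.nil_append,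
      pvFilter_pares ds hpre sp.1 sp.2 hmem]
  simp only [hidx]
  congr 1
  by_cases hfmt : sp.2.any (fun q => (PySem.Dict.mk q.2).contains "activaciones_acumuladas") = true
  · rw [if_pos hfmt, if_pos ((pvCarriers_ne_nil_iff sp.2).mpr hfmt), pvCarriers_sum, zero_add]
  · rw [if_neg hfmt, if_neg (fun h => hfmt ((pvCarriers_ne_nil_iff sp.2).mp h))]
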